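-- pv_equiv track=rewrite | github.com/dumi33/TIL_TodayILearn | 2206/0620/주식가격.py | solution
-- ===== SOURCE A (Python) =====
-- from collections import deque
--
-- def solution(prices):
--     answer = []
--     d = deque(prices)
--     while d :
--         tmp_ans = 0
--         tmp = d.popleft()
--         for price in d :
--             tmp_ans +=1
--             if price < tmp :
--                 break
--         answer.append(tmp_ans)
--     return answer
-- ===== SOURCE B (Python) =====
-- def solution(prices):
--     n = len(prices)
--     answer = [0] * n
--     stack = []  # (price, index); prices strictly increase from bottom... top is nearest
--     for i in range(n - 1, -1, -1):
--         p = prices[i]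
--         while stack and p <= stack[-1][0]:
--             stack.pop()
--         answer[i] = stack[-1][1] - i if stack else n - 1 - i
--         stack.append((p, i))
--     return answer
-- ===== Notes on version B (the rewrite author's own statement) =====
-- stated objective: faster
-- what changed: Replaces A's per-element rescan of the remaining deque with a single right-to-left pass keeping a monotonic stack of (price, index) candidates for the nearest strictly-smaller price.
import Mathlib
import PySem

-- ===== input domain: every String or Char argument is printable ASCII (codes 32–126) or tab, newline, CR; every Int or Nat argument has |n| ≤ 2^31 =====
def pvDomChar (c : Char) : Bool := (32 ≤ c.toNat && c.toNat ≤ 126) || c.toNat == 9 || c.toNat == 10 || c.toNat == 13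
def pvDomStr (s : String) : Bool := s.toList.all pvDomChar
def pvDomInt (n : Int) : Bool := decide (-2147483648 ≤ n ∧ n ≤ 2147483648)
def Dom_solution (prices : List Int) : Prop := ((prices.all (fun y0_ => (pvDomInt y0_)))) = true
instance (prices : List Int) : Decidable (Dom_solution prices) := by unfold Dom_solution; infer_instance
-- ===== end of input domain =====

-- B replaces A's quadratic rescans with a single right-to-left monotonic-stack pass (O(n)); faster, asymptotic.

-- ===== PORT A =====
-- the inner 'for price in d: tmp_ans += 1; if price < tmp: break' loop
def innerCount (tmp : Int) : List Int → Int
  | [] => 0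
  | p :: ps => if p < tmp then 1 else 1 + innerCount tmp ps

-- the outer 'while d: tmp = d.popleft(); …; answer.append(…)' loop
def solution : List Int → List Int
  | [] => []
  | tmp :: d => innerCount tmp d :: solution d

-- ===== PORT B =====
-- pairs each element with its index (Python's prices[i] access in the indexed loop)
def withIdx : List Int → Int → List (Int × Int)
  | [], _ => []
  | x :: xs, i => (x, i) :: withIdx xs (i + 1)

-- the 'for i in range(n-1, -1, -1)' loop, as structural recursion from the right;
-- the inner 'while stack and p <= stack[-1][0]: stack.pop()' is the dropWhile
def altGo (n : Int) : List (Int × Int) → List Int × List (Int × Int)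
  | [] => ([], [])
  | (p, i) :: rest =>
      let r := altGo n rest
      let st := r.2.dropWhile (fun q => p ≤ q.1)
      let a : Int := match st with
        | [] => n - 1 - i
        | q :: _ => q.2 - i
      (a :: r.1, (p, i) :: st)

def solution_alt (prices : List Int) : List Int :=
  (altGo prices.length (withIdx prices 0)).1

-- ===== PRECONDITION & SPEC =====
def Spec_solution (prices : List Int) (out : List Int) : Prop := out = solution_alt prices
instance (prices : List Int) (out : List Int) : Decidable (Spec_solution prices out) := by unfold Spec_solution; infer_instance

-- ===== CLAIM (what is proved, stated in full; the proofs are below) =====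
def Claim_equal_solution : Prop := ∀ (prices : List Int), Dom_solution prices → Spec_solution prices (solution prices)

-- ===== LEMMAS AND PROOFS =====

-- dropping with a stronger predicate first, then a weaker one, is dropping with the weaker one
theorem dropWhile_dropWhile_imp {α : Type} (r q : α → Bool) (l : List α)
    (h : ∀ a, r a = true → q a = true) :
    (l.dropWhile r).dropWhile q = l.dropWhile q := by
  induction l with
  | nil => rfl
  | cons a l ih =>
      by_cases hr : r a = true
      · simp [List.dropWhile, hr, h a hr, ih]
      · simp at hr
        simp [List.dropWhile, hr]

-- stack invariant: after processing the suffix 'rest' (indices from i0), popping the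
-- stack down below any price p reads off exactly A's inner count for p over 'rest'
theorem stack_spec (n : Int) (rest : List Int) (i0 p : Int) :
    (match (altGo n (withIdx rest i0)).2.dropWhile (fun q => p ≤ q.1) with
      | [] => (rest.length : Int)
      | q :: _ => q.2 - i0 + 1) = innerCount p rest := by
  induction rest generalizing i0 p with
  | nil => simp [withIdx, altGo, innerCount]
  | cons x xs ih =>
      simp only [withIdx, altGo, innerCount]
      by_cases hx : x < p
      · have hnp : (decide (p ≤ x)) = false := by simp; omega
        simp [List.dropWhile, hnp, hx]
      · have hdec : (decide (p ≤ x)) = true := by simp; omega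
        rw [List.dropWhile]
        simp only [hdec]
        rw [dropWhile_dropWhile_imp (fun q : Int × Int => decide (x ≤ q.1))
              (fun q : Int × Int => decide (p ≤ q.1)) _
              (by intro a ha; simp at ha ⊢; omega)]
        have hih := ih (i0 + 1) p
        rw [if_neg hx]
        rcases h : ((altGo n (withIdx xs (i0 + 1))).2.dropWhile
            (fun q : Int × Int => decide (p ≤ q.1))) with _ | ⟨q, t⟩
        · rw [h] at hih
          simp at hih ⊢
          rw [← hih]
          ring
        · rw [h] at hih
          simp at hih ⊢
          rw [← hih]
          ring

-- main invariant: the answers produced for a suffix equal A's answers for that suffix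
theorem altGo_fst (rest : List Int) (n i0 : Int) (hn : n = i0 + rest.length) :
    (altGo n (withIdx rest i0)).1 = solution rest := by
  induction rest generalizing i0 with
  | nil => simp [withIdx, altGo, solution]
  | cons x xs ih =>
      simp only [withIdx, altGo, solution]
      have hst := stack_spec n xs (i0 + 1) x
      have hxs := ih (i0 + 1) (by simp at hn ⊢; omega)
      simp at hn
      rcases h : ((altGo n (withIdx xs (i0 + 1))).2.dropWhile
          (fun q : Int × Int => decide (x ≤ q.1))) with _ | ⟨q, t⟩
      · rw [h] at hst
        simp at hst ⊢
        refine ⟨by rw [← hst]; omega, hxs⟩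
      · rw [h] at hst
        simp at hst ⊢
        refine ⟨by rw [← hst]; ring, hxs⟩

-- ===== VERDICT (by name: the statement is the Claim_ definition above) =====
theorem solution_spec : Claim_equal_solution := by
  intro prices _
  unfold Spec_solution solution_alt
  exact (altGo_fst prices prices.length 0 (by simp)).symm
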